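-- pv_equiv track=rewrite | github.com/Valium-K/algorithm-study | dev.valium.algorithm/백준/기초/브루트 포스/3085.py | get_longest_row_or_col
-- ===== SOURCE A (Python) =====
-- def get_longest_row_or_col(arr):
--     max = 0
--     cur_count = 1
--
--     # 가로
--     for i in range(len(arr)):
--         cur_color = arr[i][0]
--         cur_count = 1
--         for j in range(1, len(arr[0])):
--             if cur_color == arr[i][j]:
--                 cur_count += 1
--             else:
--                 if cur_count > max:
--                     max = cur_count
--                 cur_color = arr[i][j]
--                 cur_count = 1
--         if cur_count > max:
--             max = cur_count
--     # 세로
--     for i in range(len(arr)):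
--         cur_color = arr[0][i]
--         cur_count = 1
--         for j in range(1, len(arr[0])):
--             if cur_color == arr[j][i]:
--                 cur_count += 1
--             else:
--                 if cur_count > max:
--                     max = cur_count
--                 cur_color = arr[j][i]
--                 cur_count = 1
--         if cur_count > max:
--             max = cur_count
--     return max
-- ===== SOURCE B (Python) =====
-- def longest_run(seq):
--     cuts = [k for k in range(1, len(seq)) if seq[k] != seq[k - 1]]
--     bounds = [0] + cuts + [len(seq)]
--     return max((b - a for a, b in zip(bounds, bounds[1:])), default=0)
--
--
-- def get_longest_row_or_col(arr):
--     n = len(arr)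
--     best = 0
--     for i in range(n):
--         best = max(best, longest_run(arr[i][:n]),
--                    longest_run([arr[j][i] for j in range(n)]))
--     return best
-- ===== Notes on version B (the rewrite author's own statement) =====
-- stated objective: alternative
-- what changed: A streams a run counter over every row and column; B instead lists each line's change-point indices, brackets them with 0 and n into a boundary list, and returns the maximal difference of adjacent boundaries via zip.
import Mathlib
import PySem

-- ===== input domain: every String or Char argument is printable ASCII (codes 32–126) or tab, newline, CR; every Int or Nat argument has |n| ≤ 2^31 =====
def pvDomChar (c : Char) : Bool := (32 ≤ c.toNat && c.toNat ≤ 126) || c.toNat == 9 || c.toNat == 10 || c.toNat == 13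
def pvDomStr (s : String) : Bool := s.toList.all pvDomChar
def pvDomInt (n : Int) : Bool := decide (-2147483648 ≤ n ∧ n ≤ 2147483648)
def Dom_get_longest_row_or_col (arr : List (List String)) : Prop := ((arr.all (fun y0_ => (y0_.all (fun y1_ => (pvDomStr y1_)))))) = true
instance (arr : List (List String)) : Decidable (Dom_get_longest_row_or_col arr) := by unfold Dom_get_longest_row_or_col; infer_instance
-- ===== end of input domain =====

-- B replaces A's streaming run counters by a change-point algorithm: it lists the indices
-- where a row/column changes colour, brackets them with 0 and n, and returns the maximal
-- difference of adjacent boundaries (objective: alternative).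

-- ===== PORT A =====
-- arr[i][j] (exact under Pre_: both indices in range there)
def pvCell (arr : List (List String)) (i j : Int) : String :=
  PySem.List.pyGetD (PySem.List.pyGetD arr i []) j ""

-- body of A's inner 'for j in range(1, len(arr[0]))' loop (identical in both of A's loops)
def pvAstep (g : Int → String) (st : Int × Int × String) (j : Int) : Int × Int × String :=
  if st.2.2 == g j then (st.1, st.2.1 + 1, st.2.2)
  else ((if st.2.1 > st.1 then st.2.1 else st.1), 1, g j)

-- one iteration of A's outer loops: scan one line (given by access function g) updating max
def pvRowScan (g : Int → String) (m mx : Int) : Int :=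
  let s := (PySem.List.pyRange 1 m 1).foldl (pvAstep g) (mx, 1, g 0)
  if s.2.1 > s.1 then s.2.1 else s.1

def get_longest_row_or_col (arr : List (List String)) : Int :=
  let m : Int := (PySem.List.pyGetD arr 0 []).length
  let mx1 := (PySem.List.pyRange 0 (arr.length : Int) 1).foldl
    (fun mx i => pvRowScan (fun j => pvCell arr i j) m mx) 0
  (PySem.List.pyRange 0 (arr.length : Int) 1).foldl
    (fun mx i => pvRowScan (fun j => pvCell arr j i) m mx) mx1

-- ===== PORT B =====
-- Source B longest_run: change-point indices, boundaries [0]+cuts+[n], max adjacent gap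
def longestRun (seq : List String) : Int :=
  let n : Int := seq.length
  let cuts := (PySem.List.pyRange 1 n 1).filter
    (fun k => !(PySem.List.pyGetD seq k "" == PySem.List.pyGetD seq (k - 1) ""))
  let bounds := 0 :: (cuts ++ [n])
  (List.zipWith (fun a b => b - a) bounds bounds.tail).foldl max 0

def get_longest_row_or_col_alt (arr : List (List String)) : Int :=
  let n : Int := arr.length
  (PySem.List.pyRange 0 n 1).foldl (fun best i =>
    max (max best (longestRun (PySem.List.slice (PySem.List.pyGetD arr i []) none (some n))))
        (longestRun ((PySem.List.pyRange 0 n 1).map (fun j => pvCell arr j i)))) 0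

-- ===== PRECONDITION & SPEC =====
-- Pre_ is exactly the set of inputs on which the Python A returns (elsewhere A raises
-- IndexError): the empty grid, or a grid whose first row has length len(arr) and whose
-- every row has length ≥ len(arr).
def Pre_get_longest_row_or_col (arr : List (List String)) : Prop :=
  arr = [] ∨ ((arr.headD []).length = arr.length ∧ ∀ row ∈ arr, arr.length ≤ row.length)
instance (arr : List (List String)) : Decidable (Pre_get_longest_row_or_col arr) := by
  unfold Pre_get_longest_row_or_col; infer_instance

def pvWitness_get_longest_row_or_col : List (List String) := [["a", "b"], ["b", "b"]]

def Spec_get_longest_row_or_col (arr : List (List String)) (out : Int) : Prop := out = get_longest_row_or_col_alt arr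
instance (arr : List (List String)) (out : Int) : Decidable (Spec_get_longest_row_or_col arr out) := by unfold Spec_get_longest_row_or_col; infer_instance

-- ===== CLAIM (what is proved, stated in full; the proofs are below) =====
def Claim_equal_get_longest_row_or_col : Prop := ∀ (arr : List (List String)), Dom_get_longest_row_or_col arr → Pre_get_longest_row_or_col arr → Spec_get_longest_row_or_col arr (get_longest_row_or_col arr)

-- ===== LEMMAS AND PROOFS =====

lemma pv_ifmax (a b : Int) : (if a > b then a else b) = max a b := by
  split <;> omega

-- proof-side streaming scan (the common intermediate between A's scan and B's change points)
def pvBStep (g : Int → String) (st : Int × Int) (k : Int) : Int × Int :=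
  let cur := if g k == g (k - 1) then st.2 + 1 else 1
  ((if cur > st.1 then cur else st.1), cur)

-- adjacent differences of a boundary list, structurally
def pvDiffs : Int → List Int → List Int
  | _, [] => []
  | b, c :: cs => (c - b) :: pvDiffs c cs

lemma pv_zip_diffs : ∀ (rest : List Int) (b : Int),
    List.zipWith (fun a c => c - a) (b :: rest) rest = pvDiffs b rest := by
  intro rest
  induction rest with
  | nil => intro b; rfl
  | cons c cs ih => intro b; simp only [List.zipWith, pvDiffs, ih c]

-- the boundary list filter⧺[m] is nonempty with head ≥ t+1
lemma pv_head_ge (p : Int → Bool) (m t : Int) (h : t < m) :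
    ∃ c cs, ((PySem.List.pyRange (t+1) m 1).filter p) ++ [m] = c :: cs ∧ t + 1 ≤ c := by
  cases hf : (PySem.List.pyRange (t+1) m 1).filter p with
  | nil => exact ⟨m, [], by simp, by omega⟩
  | cons c cs =>
    refine ⟨c, cs ++ [m], by simp, ?_⟩
    have hc : c ∈ (PySem.List.pyRange (t+1) m 1).filter p := by
      rw [hf]; exact List.mem_cons_self
    exact (PySem.List.mem_pyRange_one.mp (List.mem_of_mem_filter hc)).1

-- core invariant: A-style streaming state vs max gap of change-point boundaries
lemma pv_stream (g : Int → String) (m : Int) :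
    ∀ (k : Nat) (t best cur : Int), (m - t).toNat = k → t ≤ m → 1 ≤ cur → cur ≤ best →
    ((PySem.List.pyRange t m 1).foldl (pvBStep g) (best, cur)).1
      = List.foldl max best (pvDiffs (t - cur)
          (((PySem.List.pyRange t m 1).filter (fun j => !(g j == g (j - 1)))) ++ [m])) := by
  intro k
  induction k with
  | zero =>
    intro t best cur hk ht hc hcb
    have htm : t = m := by omega
    rw [PySem.List.pyRange_one_eq_nil (by omega)]
    subst htm
    simp [pvDiffs]
    omega
  | succ k ih =>
    intro t best cur hk ht hc hcb
    have htm : t < m := by omega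
    rw [PySem.List.pyRange_one_cons htm]
    simp only [List.foldl_cons, List.filter_cons]
    by_cases h : g t = g (t - 1)
    · have hb : (!(g t == g (t - 1))) = false := by simp [h]
      rw [hb]
      simp only [Bool.false_eq_true, if_false]
      have hB : pvBStep g (best, cur) t
          = ((if cur + 1 > best then cur + 1 else best), cur + 1) := by
        simp [pvBStep, h]
      rw [hB]
      have := ih (t + 1) (if cur + 1 > best then cur + 1 else best) (cur + 1)
        (by omega) (by omega) (by omega) (by split <;> omega)
      rw [this]
      have he : t + 1 - (cur + 1) = t - cur := by omega
      rw [he]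
      obtain ⟨c, cs, hcc, hcge⟩ :=
        pv_head_ge (fun j => !(g j == g (j - 1))) m t htm
      rw [hcc]
      simp only [pvDiffs, List.foldl_cons]
      have : max (if cur + 1 > best then cur + 1 else best) (c - (t - cur))
          = max best (c - (t - cur)) := by
        split <;> omega
      rw [this]
    · have hb : (!(g t == g (t - 1))) = true := by
        simp only [Bool.not_eq_true', beq_eq_false_iff_ne, ne_eq]; exact h
      rw [hb]
      simp only [if_true]
      have hB : pvBStep g (best, cur) t = (best, 1) := by
        have : (g t == g (t - 1)) = false := by
          simp only [beq_eq_false_iff_ne, ne_eq]; exact h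
        simp [pvBStep, this]
        omega
      rw [hB]
      have := ih (t + 1) best 1 (by omega) (by omega) (by omega) (by omega)
      rw [this]
      have he : t + 1 - 1 = t := by omega
      rw [he]
      simp only [List.cons_append, pvDiffs, List.foldl_cons]
      have : t - (t - cur) = cur := by omega
      rw [this]
      have : max best cur = best := by omega
      rw [this]

-- B's longest_run over a concrete list equals the streaming scan over an access function
lemma pv_longestRun_eq (seq : List String) (g : Int → String) (m : Int)
    (hm : 1 ≤ m) (hlen : (seq.length : Int) = m)
    (hg : ∀ k : Int, 0 ≤ k → k < m → PySem.List.pyGetD seq k "" = g k) :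
    longestRun seq
      = ((PySem.List.pyRange 1 m 1).foldl (pvBStep g) (1, 1)).1 := by
  unfold longestRun
  rw [hlen]
  simp only []
  have hfc : (PySem.List.pyRange 1 m 1).filter
        (fun k => !(PySem.List.pyGetD seq k "" == PySem.List.pyGetD seq (k - 1) ""))
      = (PySem.List.pyRange 1 m 1).filter (fun j => !(g j == g (j - 1))) := by
    apply List.filter_congr
    intro x hx
    obtain ⟨h1, h2⟩ := PySem.List.mem_pyRange_one.mp hx
    rw [hg x (by omega) h2, hg (x - 1) (by omega) (by omega)]
  simp only [hfc]
  simp only [List.tail_cons]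
  rw [pv_zip_diffs]
  rw [pv_stream g m (m - 1).toNat 1 1 1 rfl (by omega) le_rfl le_rfl]
  have h0 : (1 : Int) - 1 = 0 := by norm_num
  rw [h0]
  obtain ⟨c, cs, hcc, hcge⟩ := pv_head_ge (fun j => !(g j == g (j - 1))) m 0 (by omega)
  have hcc' : ((PySem.List.pyRange 1 m 1).filter (fun j => !(g j == g (j - 1)))) ++ [m]
      = c :: cs := by simpa using hcc
  rw [hcc']
  simp only [pvDiffs, List.foldl_cons]
  have : max 0 (c - 0) = max 1 (c - 0) := by omega
  rw [this]

-- core invariant: A's inner scan state vs the streaming (best, cur) state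
lemma pv_core (g : Int → String) :
    ∀ (k : Nat) (t m mx0 mx cnt best : Int), (m - t).toNat = k →
    max cnt mx = max mx0 best →
    (let sA := (PySem.List.pyRange t m 1).foldl (pvAstep g) (mx, cnt, g (t - 1))
     let sB := (PySem.List.pyRange t m 1).foldl (pvBStep g) (best, cnt)
     max sA.2.1 sA.1 = max mx0 sB.1) := by
  intro k
  induction k with
  | zero =>
    intro t m mx0 mx cnt best hk hH
    rw [PySem.List.pyRange_one_eq_nil (by omega)]
    simpa using hH
  | succ k ih =>
    intro t m mx0 mx cnt best hk hH
    rw [PySem.List.pyRange_one_cons (by omega : t < m)]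
    simp only [List.foldl_cons]
    by_cases h : g (t - 1) = g t
    · have hA : pvAstep g (mx, cnt, g (t - 1)) t = (mx, cnt + 1, g (t + 1 - 1)) := by
        simp [pvAstep, h, add_sub_cancel_right]
      have hB : pvBStep g (best, cnt) t
          = ((if cnt + 1 > best then cnt + 1 else best), cnt + 1) := by
        simp [pvBStep, h.symm]
      rw [hA, hB]
      exact ih (t + 1) m mx0 mx (cnt + 1) _ (by omega)
        (by rw [pv_ifmax]; omega)
    · have hab : (g (t - 1) == g t) = false := by
        simp only [beq_eq_false_iff_ne, ne_eq]; exact h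
      have hba : (g t == g (t - 1)) = false := by
        simp only [beq_eq_false_iff_ne, ne_eq]
        exact fun e => h e.symm
      have hA : pvAstep g (mx, cnt, g (t - 1)) t
          = ((if cnt > mx then cnt else mx), 1, g (t + 1 - 1)) := by
        simp [pvAstep, hab, add_sub_cancel_right]
      have hB : pvBStep g (best, cnt) t = ((if 1 > best then 1 else best), 1) := by
        simp [pvBStep, hba]
      rw [hA, hB]
      exact ih (t + 1) m mx0 _ 1 _ (by omega)
        (by rw [pv_ifmax, pv_ifmax]; omega)

-- one outer-loop iteration of A equals 'max mx (the streaming scan over g)'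
lemma pv_rowscan (g : Int → String) (m mx : Int) :
    pvRowScan g m mx
      = max mx ((PySem.List.pyRange 1 m 1).foldl (pvBStep g) (1, 1)).1 := by
  have h := pv_core g (m - 1).toNat 1 m mx mx 1 1 rfl (by omega)
  simp only [show (1 : Int) - 1 = 0 by norm_num] at h
  simp only [pvRowScan]
  rw [pv_ifmax]
  exact h

lemma pv_foldl_max_out (g : Int → Int) (L : List Int) :
    ∀ (a c : Int), L.foldl (fun mx i => max mx (g i)) (max a c)
      = max c (L.foldl (fun mx i => max mx (g i)) a) := by
  induction L with
  | nil => intro a c; simp [max_comm]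
  | cons x L ih =>
    intro a c
    simp only [List.foldl_cons]
    rw [show max (max a c) (g x) = max (max a (g x)) c by
      rw [max_right_comm], ih]

lemma pv_foldl_max_pair (R C : Int → Int) (L : List Int) :
    ∀ (a : Int), L.foldl (fun b i => max (max b (R i)) (C i)) a
      = L.foldl (fun mx i => max mx (C i)) (L.foldl (fun mx i => max mx (R i)) a) := by
  induction L with
  | nil => intro a; rfl
  | cons x L ih =>
    intro a
    simp only [List.foldl_cons]
    rw [ih, pv_foldl_max_out _ _ (max a (R x)) (C x), max_comm (C x)]

-- ===== VERDICT (by name: the statement is the Claim_ definition above) =====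
theorem get_longest_row_or_col_spec : Claim_equal_get_longest_row_or_col := by
  intro arr _ hpre
  unfold Spec_get_longest_row_or_col
  rcases hpre with h | ⟨hm, hrows⟩
  · subst h; rfl
  rcases arr with _ | ⟨r0, rest⟩
  · rfl
  set arr := r0 :: rest with harr
  set n : Int := (arr.length : Int) with hn
  have hn0 : 0 < n := by simp [hn, harr]
  have hm0 : r0.length = arr.length := by simpa [harr] using hm
  have hm' : ((PySem.List.pyGetD arr 0 []).length : Int) = n := by
    rw [harr, PySem.List.pyGetD_zero_cons, hn]
    exact_mod_cast hm0
  have hrow : ∀ i : Int, 0 ≤ i → i < n →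
      pvRowScan (fun j => pvCell arr i j) n
        = fun mx => max mx (longestRun
            (PySem.List.slice (PySem.List.pyGetD arr i []) none (some n))) := by
    intro i h0 h1
    funext mx
    rw [pv_rowscan]
    congr 1
    have hi : i.toNat < arr.length := by omega
    have hrl : (n : Int) ≤ ((arr[i.toNat]).length : Int) := by
      have := hrows (arr[i.toNat]) (List.getElem_mem hi)
      omega
    have hlen2 : ((List.take n.toNat arr[i.toNat]).length : Int) = n := by
      simp only [List.length_take]
      push_cast
      omega
    refine (pv_longestRun_eq _ (fun j => pvCell arr i j) n (by omega) ?_ ?_).symm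
    · rw [PySem.List.pyGetD_eq_getElem arr [] h0 (by omega),
        PySem.List.slice_to _ (le_of_lt hn0)]
      exact hlen2
    · intro k hk0 hkn
      rw [PySem.List.pyGetD_eq_getElem arr [] h0 (by omega),
        PySem.List.slice_to _ (le_of_lt hn0)]
      rw [PySem.List.pyGetD_eq_getElem _ "" hk0 (by omega)]
      simp only [pvCell]
      rw [PySem.List.pyGetD_eq_getElem arr [] h0 (by omega),
        PySem.List.pyGetD_eq_getElem _ "" hk0 (by omega)]
      simp [List.getElem_take]
  have hcol : ∀ i : Int, 0 ≤ i → i < n →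
      pvRowScan (fun j => pvCell arr j i) n
        = fun mx => max mx (longestRun
            ((PySem.List.pyRange 0 n 1).map (fun j => pvCell arr j i))) := by
    intro i _ _
    funext mx
    rw [pv_rowscan]
    congr 1
    refine (pv_longestRun_eq _ (fun j => pvCell arr j i) n (by omega) ?_ ?_).symm
    · simp [PySem.List.length_pyRange_one]
      omega
    · intro k hk0 hkn
      exact PySem.List.pyGetD_map_pyRange_of_nonneg _ n k "" hk0 hkn
  show get_longest_row_or_col arr = get_longest_row_or_col_alt arr
  unfold get_longest_row_or_col get_longest_row_or_col_alt
  simp only [hm', ← hn]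
  rw [PySem.List.foldl_congr_mem _ _
      (fun mx i => max mx (longestRun
        (PySem.List.slice (PySem.List.pyGetD arr i []) none (some n)))) 0
      (by intro acc x hx
          obtain ⟨h1, h2⟩ := PySem.List.mem_pyRange_one.mp hx
          exact congrFun (hrow x h1 h2) acc)]
  rw [PySem.List.foldl_congr_mem _ _
      (fun mx i => max mx (longestRun
        ((PySem.List.pyRange 0 n 1).map (fun j => pvCell arr j i)))) _
      (by intro acc x hx
          obtain ⟨h1, h2⟩ := PySem.List.mem_pyRange_one.mp hx
          exact congrFun (hcol x h1 h2) acc)]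
  rw [pv_foldl_max_pair]
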